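-- pv_equiv track=rewrite | github.com/chz10/work_code | test区分车型.py | extract_car_type
-- ===== SOURCE A (Python) =====
-- def extract_car_type(path: str) -> str:
--     parts = path.replace("\\", "/").split("/")
--
--     # ---------- 强规则：xin_data ----------
--     for i, part in enumerate(parts):
--         if part.startswith("xin_data_") and i >= 1:
--             return parts[i - 1]
--
--     # ---------- 兜底规则 ----------
--     candidates = []
--     for p in parts:
--         pl = p.lower()
--         if (
--             3 <= len(p) <= 20
--             and not p.isdigit()
--             and any(c.isalpha() for c in p)
--             and not pl.startswith(("xin", "video", "output"))
--         ):
--             candidates.append(p)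
--
--     return candidates[-1] if candidates else "unknown"
-- ===== SOURCE B (Python) =====
-- def extract_car_type(path: str) -> str:
--     parts = path.replace("\\", "/").split("/")
--     # single fused pass: remember the previous component and the most recent
--     # acceptable candidate; the strong rule fires immediately when seen.
--     prev = None
--     last_candidate = None
--     for part in parts:
--         if prev is not None and part.startswith("xin_data_"):
--             return prev
--         pl = part.lower()
--         if (3 <= len(part) <= 20
--                 and not part.isdigit()
--                 and any(c.isalpha() for c in part)
--                 and not pl.startswith(("xin", "video", "output"))):
--             last_candidate = part
--         prev = part
--     return last_candidate if last_candidate is not None else "unknown"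
-- ===== Notes on version B (the rewrite author's own statement) =====
-- stated objective: alternative
-- what changed: A makes two staged scans (an enumerate scan returning parts[i-1] at the first xin_data_ marker, then a second scan building a full candidates list and taking its last element); B is one fused left-to-right pass holding two state variables (previous component, most recent acceptable candidate) that returns at the marker and otherwise keeps only the latest candidate, never building a list or indexing.
import Mathlib
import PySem

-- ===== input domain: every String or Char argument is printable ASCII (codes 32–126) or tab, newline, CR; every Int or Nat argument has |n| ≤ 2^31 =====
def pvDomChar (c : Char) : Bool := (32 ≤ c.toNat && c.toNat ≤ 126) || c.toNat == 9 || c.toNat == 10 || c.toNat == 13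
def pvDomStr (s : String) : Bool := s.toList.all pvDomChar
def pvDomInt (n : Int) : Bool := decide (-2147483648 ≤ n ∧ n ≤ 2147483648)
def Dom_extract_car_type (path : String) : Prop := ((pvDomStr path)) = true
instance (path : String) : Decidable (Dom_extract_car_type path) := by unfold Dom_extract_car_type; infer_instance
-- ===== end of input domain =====

-- B replaces A's two staged scans (index-based marker scan, then a candidates list) by one fused
-- pass carrying two state variables; alternative decomposition, same cost.

-- shared helper: the candidate predicate, textually identical in both Pythons
def ectIsCand (p : String) : Bool :=
  let pl := PySem.Str.lower p
  decide (3 ≤ PySem.Str.len p) && decide (PySem.Str.len p ≤ 20)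
    && !(PySem.Str.strIsdigit p)
    && p.toList.any (fun c => PySem.Chars.isalpha c)
    && !(PySem.Str.startswith pl "xin" || PySem.Str.startswith pl "video" || PySem.Str.startswith pl "output")

-- ===== PORT A =====
-- the enumerate loop: explicit index counter, returns parts[i-1] via pyGet?
def ectXinA (parts : List String) (i : Nat) : List String → Option String
  | [] => none
  | part :: rest =>
    if PySem.Str.startswith part "xin_data_" && decide (1 ≤ i) then
      some ((PySem.List.pyGet? parts ((i : Int) - 1)).getD "")
    else ectXinA parts (i + 1) rest

def extract_car_type (path : String) : String :=
  let parts := (PySem.Str.split? (PySem.Str.replace path "\\" "/") "/").getD []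
  match ectXinA parts 0 parts with
  | some s => s
  | none =>
    let candidates := parts.foldl (fun acc p => if ectIsCand p then acc ++ [p] else acc) []
    if candidates.isEmpty then "unknown"
    else (PySem.List.pyGet? candidates (-1)).getD ""

-- ===== PORT B =====
-- single fused loop: state = (previous component, most recent acceptable candidate)
def ectLoopB (prev : Option String) (lastCand : Option String) : List String → String
  | [] => lastCand.getD "unknown"
  | part :: rest =>
    if prev.isSome && PySem.Str.startswith part "xin_data_" then prev.getD ""
    else ectLoopB (some part) (if ectIsCand part then some part else lastCand) rest

def extract_car_type_alt (path : String) : String :=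
  let parts := (PySem.Str.split? (PySem.Str.replace path "\\" "/") "/").getD []
  ectLoopB none none parts

-- ===== PRECONDITION & SPEC =====
def Spec_extract_car_type (path : String) (out : String) : Prop := out = extract_car_type_alt path
instance (path : String) (out : String) : Decidable (Spec_extract_car_type path out) := by unfold Spec_extract_car_type; infer_instance

-- ===== CLAIM (what is proved, stated in full; the proofs are below) =====
def Claim_equal_extract_car_type : Prop := ∀ (path : String), Dom_extract_car_type path → Spec_extract_car_type path (extract_car_type path)

-- ===== LEMMAS AND PROOFS =====

-- common characterization of the xin_data rule on adjacent pairs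
def ectPairSpec : List String → Option String
  | [] => none
  | [_] => none
  | a :: b :: rest =>
    if PySem.Str.startswith b "xin_data_" then some a else ectPairSpec (b :: rest)

lemma ectXinA_aux (parts : List String) :
    ∀ (rest : List String) (k : Nat), k < parts.length → parts.drop (k + 1) = rest →
      ectXinA parts (k + 1) rest = ectPairSpec (parts.drop k) := by
  intro rest
  induction rest with
  | nil =>
    intro k hk hr
    have hd : parts.drop k = [parts[k]] := by
      rw [List.drop_eq_getElem_cons hk, hr]
    simp [ectXinA, hd, ectPairSpec]
  | cons cur rest2 ih =>
    intro k hk hr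
    have hd : parts.drop k = parts[k] :: cur :: rest2 := by
      rw [List.drop_eq_getElem_cons hk, hr]
    have hk1 : k + 1 < parts.length := by
      by_contra h
      have : parts.drop (k + 1) = [] := List.drop_eq_nil_of_le (by omega)
      rw [hr] at this; exact List.cons_ne_nil _ _ this
    have hr2 : parts.drop (k + 2) = rest2 := by
      have h2 := List.drop_eq_getElem_cons hk1
      rw [hr] at h2
      injection h2 with _ h3
      exact h3.symm
    by_cases hs : PySem.Str.startswith cur "xin_data_"
    all_goals simp at hs
    · simp [ectXinA, hs, hd, ectPairSpec, PySem.List.pyGet?_natCast,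
        List.getElem?_eq_getElem hk]
    · have := ih (k + 1) hk1 hr2
      simp [ectXinA, hs, hd, ectPairSpec, this, hr]

lemma ectXinA_eq (parts : List String) : ectXinA parts 0 parts = ectPairSpec parts := by
  cases parts with
  | nil => rfl
  | cons a t =>
    have h0 : ectXinA (a :: t) 0 (a :: t) = ectXinA (a :: t) 1 t := by simp [ectXinA]
    have haux := ectXinA_aux (a :: t) t 0 (by simp) (by simp)
    rw [h0]
    simpa using haux

lemma getLast?_cons_or {α : Type} (a : α) (l : List α) :
    (a :: l).getLast? = l.getLast?.or (some a) := by
  cases l with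
  | nil => rfl
  | cons b t =>
    rw [List.getLast?_cons_cons]
    cases h : (b :: t).getLast? with
    | some x => rfl
    | none => simp at h

-- loop invariant for B's fused pass, once prev is set
lemma ectLoopB_inv (rest : List String) : ∀ (pv : String) (lc : Option String),
    ectLoopB (some pv) lc rest =
      match ectPairSpec (pv :: rest) with
      | some s => s
      | none => (((List.filter ectIsCand rest).getLast?).or lc).getD "unknown" := by
  induction rest with
  | nil => intro pv lc; simp [ectLoopB, ectPairSpec]
  | cons part rest2 ih =>
    intro pv lc
    by_cases hs : PySem.Str.startswith part "xin_data_"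
    all_goals simp at hs
    · simp [ectLoopB, ectPairSpec, hs]
    · have step : (List.filter ectIsCand (part :: rest2)).getLast?.or lc =
          ((List.filter ectIsCand rest2).getLast?).or (if ectIsCand part then some part else lc) := by
        by_cases hc : ectIsCand part
        · simp [List.filter, hc, getLast?_cons_or]
        · simp [List.filter, hc]
      have hps : ectPairSpec (pv :: part :: rest2) = ectPairSpec (part :: rest2) := by
        simp [ectPairSpec, hs]
      rw [hps, step]
      simp [ectLoopB, hs, ih]

lemma ectLoopB_eq (parts : List String) :
    ectLoopB none none parts =
      match ectPairSpec parts with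
      | some s => s
      | none => ((List.filter ectIsCand parts).getLast?).getD "unknown" := by
  cases parts with
  | nil => rfl
  | cons a rest =>
    have h0 : ectLoopB none none (a :: rest) =
        ectLoopB (some a) (if ectIsCand a then some a else none) rest := by
      simp [ectLoopB]
    have hf : (List.filter ectIsCand (a :: rest)).getLast? =
        ((List.filter ectIsCand rest).getLast?).or (if ectIsCand a then some a else none) := by
      by_cases hc : ectIsCand a
      · simp [List.filter, hc, getLast?_cons_or]
      · simp [List.filter, hc]
    rw [h0, ectLoopB_inv, hf]

lemma pyGet_neg_one {α : Type} (l : List α) : PySem.List.pyGet? l (-1) = l.getLast? := by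
  rcases l with _ | ⟨a, t⟩
  · rfl
  · simp [PySem.List.pyGet?, PySem.List.pyIdx?, List.getLast?_eq_getElem?]

-- ===== VERDICT (by name: the statement is the Claim_ definition above) =====
theorem extract_car_type_spec : Claim_equal_extract_car_type := by
  intro path _
  unfold Spec_extract_car_type extract_car_type extract_car_type_alt
  set parts := (PySem.Str.split? (PySem.Str.replace path "\\" "/") "/").getD [] with hp
  simp only [ectLoopB_eq, ectXinA_eq]
  cases hx : ectPairSpec parts with
  | some s => simp
  | none =>
    have hcand : parts.foldl (fun acc p => if ectIsCand p then acc ++ [p] else acc) [] =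
        List.filter ectIsCand parts := by
      simpa using PySem.List.foldl_append_if ectIsCand id parts []
    simp only [hcand]
    cases hF : List.filter ectIsCand parts with
    | nil => simp
    | cons x xs =>
      simp [pyGet_neg_one, List.getLast?_eq_some_getLast (l := x :: xs) (List.cons_ne_nil _ _)]
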